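-- pv_equiv track=rewrite | github.com/sramim/algohw6 | maxsum.py | parse
-- ===== SOURCE A (Python) =====
-- def parse(str):
--     indices = []
--     values = []
--     for char in str.split():
--         if len(indices) < 1:
--             indices = char.replace("(", "").replace(")", "").split(",")
--         else:
--             values = char.replace("(", "").replace(")", "").split(",")
--
--     return [indices, values]
-- ===== SOURCE B (Python) =====
-- def _clean(tok):
--     return tok.replace("(", "").replace(")", "").split(",")
--
--
-- def parse(str):
--     # Only the first whitespace token ever becomes `indices`, and `values`
--     # ends up as the last token (each later token overwrites it) -- so no loop.
--     tokens = str.split()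
--     if not tokens:
--         return [[], []]
--     values = _clean(tokens[-1]) if len(tokens) > 1 else []
--     return [_clean(tokens[0]), values]
-- ===== Notes on version B (the rewrite author's own statement) =====
-- stated objective: simpler
-- what changed: Replaces A's overwrite-in-a-loop with a direct closed-form pick: indices = cleaned first whitespace token, values = cleaned last token when there are at least two, no loop at all.
import Mathlib
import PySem

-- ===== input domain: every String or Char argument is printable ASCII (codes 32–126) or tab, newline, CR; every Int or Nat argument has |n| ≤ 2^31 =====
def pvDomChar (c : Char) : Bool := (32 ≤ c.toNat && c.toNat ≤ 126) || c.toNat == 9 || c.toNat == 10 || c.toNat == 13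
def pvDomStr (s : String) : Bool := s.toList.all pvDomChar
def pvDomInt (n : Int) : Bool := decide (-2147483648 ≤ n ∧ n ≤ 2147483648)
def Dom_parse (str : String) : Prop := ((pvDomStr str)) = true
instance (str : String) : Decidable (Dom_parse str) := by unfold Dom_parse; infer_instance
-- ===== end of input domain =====

-- B replaces A's overwrite-in-a-loop with a direct closed-form pick of the
-- first and last whitespace token (objective: simpler).

-- ===== PORT A =====
-- char.replace("(", "").replace(")", "").split(",")  (sep "," ≠ "", so Chars.splitOn is exact)
def pvCleanA (char : String) : List String :=
  (PySem.Chars.splitOn ((PySem.Str.replace (PySem.Str.replace char "(" "") ")" "").toList)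
    ",".toList).map String.mk

def parse (str : String) : List (List String) :=
  let st := (PySem.Str.split₀ str).foldl
    (fun (st : List String × List String) char =>
      if st.1.length < 1 then (pvCleanA char, st.2) else (st.1, pvCleanA char))
    ([], [])
  [st.1, st.2]

-- ===== PORT B =====
def pvClean (tok : String) : List String :=
  (PySem.Chars.splitOn ((PySem.Str.replace (PySem.Str.replace tok "(" "") ")" "").toList)
    ",".toList).map String.mk

def parse_alt (str : String) : List (List String) :=
  match PySem.Str.split₀ str with
  | [] => [[], []]
  | t :: rest =>
      [pvClean t, if rest.isEmpty then [] else pvClean ((t :: rest).getLast (by simp))]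

-- ===== PRECONDITION & SPEC =====
def Spec_parse (str : String) (out : List (List String)) : Prop := out = parse_alt str
instance (str : String) (out : List (List String)) : Decidable (Spec_parse str out) := by unfold Spec_parse; infer_instance

-- ===== CLAIM (what is proved, stated in full; the proofs are below) =====
def Claim_equal_parse : Prop := ∀ (str : String), Dom_parse str → Spec_parse str (parse str)

-- ===== LEMMAS AND PROOFS =====

theorem splitOn_go_ne_nil (fuel : Nat) :
    ∀ (sep s cur : List Char) (acc : List (List Char)),
      PySem.Chars.splitOn.go sep fuel s cur acc ≠ [] := by
  induction fuel with
  | zero =>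
      intro sep s cur acc
      unfold PySem.Chars.splitOn.go
      simp
  | succ n ih =>
      intro sep s cur acc
      unfold PySem.Chars.splitOn.go
      cases s with
      | nil => simp
      | cons c rest =>
          by_cases h : sep.isPrefixOf (c :: rest) = true
          · simpa [h] using ih sep _ _ _
          · simpa [h] using ih sep _ _ _

theorem clean_ne_nil (tok : String) : pvCleanA tok ≠ [] := by
  unfold pvCleanA PySem.Chars.splitOn
  simp only [ne_eq, List.map_eq_nil_iff]
  exact splitOn_go_ne_nil _ _ _ _ _

-- fold invariant: once indices is non-empty, it stays, and values becomes the last cleaned token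
theorem foldl_tail (rest : List String) :
    ∀ (ind v : List String), ind ≠ [] →
      rest.foldl
        (fun (st : List String × List String) char =>
          if st.1.length < 1 then (pvCleanA char, st.2) else (st.1, pvCleanA char))
        (ind, v)
      = (ind, if h : rest = [] then v else pvCleanA (rest.getLast h)) := by
  induction rest with
  | nil => intro ind v _; simp
  | cons t rest ih =>
      intro ind v hind
      have hlen : ¬ ind.length < 1 := by
        cases ind with
        | nil => exact absurd rfl hind
        | cons a l => simp
      rw [List.foldl_cons]
      simp only [hlen, if_false]
      rw [ih ind (pvCleanA t) hind]
      cases rest with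
      | nil => simp
      | cons u rest' => simp [List.getLast]

-- ===== VERDICT (by name: the statement is the Claim_ definition above) =====
theorem parse_spec : Claim_equal_parse := by
  intro str _
  unfold Spec_parse parse parse_alt
  cases h : PySem.Str.split₀ str with
  | nil => simp
  | cons t rest =>
      simp only [List.foldl_cons, List.length_nil, Nat.zero_lt_one, if_true]
      rw [foldl_tail rest (pvCleanA t) [] (clean_ne_nil t)]
      cases rest with
      | nil => simp [pvClean, pvCleanA]
      | cons u rest' =>
          simp [pvClean, pvCleanA, List.getLast]
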